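-- pv_equiv track=rewrite | github.com/daniel-reich/ubiquitous-fiesta | jwiJNMiCW6P5d2XXA_24.py | does_rhyme
-- ===== SOURCE A (Python) =====
-- def does_rhyme(txt1, txt2):
--     txt1 = txt1.lower()
--     txt2 = txt2.lower()
--     a = txt1.split(' ')
--     b = txt2.split(' ')
--     vogais = 'aeiou'
--     lista_a = []
--     lista_b = []
--     for n in vogais:
--         if n in a[-1]:
--             lista_a.append(n)
--         if n in b[-1]:
--             lista_b.append(n)
--     return lista_a == lista_b
-- ===== SOURCE B (Python) =====
-- def does_rhyme(txt1, txt2):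
--     bits = {'a': 1, 'e': 2, 'i': 4, 'o': 8, 'u': 16}
--
--     def last_word_mask(t):
--         m = 0
--         for ch in reversed(t):
--             if ch == ' ':
--                 break
--             m |= bits.get(ch.lower(), 0)
--         return m
--
--     return last_word_mask(txt1) == last_word_mask(txt2)
-- ===== Notes on version B (the rewrite author's own statement) =====
-- stated objective: alternative
-- what changed: B replaces A's lower-split-then-scan-the-vowel-string pipeline (building two order-dependent lists and comparing them) with a single backward scan of each raw text that stops at the first space and accumulates a 5-bit vowel bitmask, comparing the two integer masks; no split, no intermediate lists.
import Mathlib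
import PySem

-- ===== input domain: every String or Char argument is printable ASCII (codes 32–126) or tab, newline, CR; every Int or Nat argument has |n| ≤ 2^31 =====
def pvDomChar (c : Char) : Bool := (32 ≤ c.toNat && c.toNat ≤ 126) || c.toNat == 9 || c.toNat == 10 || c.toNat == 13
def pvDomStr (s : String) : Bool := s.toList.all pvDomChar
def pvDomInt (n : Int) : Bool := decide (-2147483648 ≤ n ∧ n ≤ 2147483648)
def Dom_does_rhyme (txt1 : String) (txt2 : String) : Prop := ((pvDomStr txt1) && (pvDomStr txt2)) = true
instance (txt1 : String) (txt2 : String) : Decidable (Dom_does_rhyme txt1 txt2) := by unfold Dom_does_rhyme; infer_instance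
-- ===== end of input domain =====

-- B replaces A's lower/split/vowel-string-scan pipeline by ONE backward scan per text that
-- stops at the first space and accumulates a 5-bit vowel bitmask; the two masks are compared.

-- ===== PORT A =====
-- str.split(' ') never returns an empty list, so a[-1]/b[-1] never raise; pyGetD's default is unreachable.
def does_rhyme (txt1 : String) (txt2 : String) : Bool :=
  let t1 := PySem.Chars.lower txt1.toList
  let t2 := PySem.Chars.lower txt2.toList
  let a := PySem.Chars.splitOn t1 [' ']
  let b := PySem.Chars.splitOn t2 [' ']
  let lastA := PySem.List.pyGetD a (-1) []
  let lastB := PySem.List.pyGetD b (-1) []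
  let r := "aeiou".toList.foldl (fun (acc : List Char × List Char) n =>
      (if PySem.Chars.isIn [n] lastA then acc.1 ++ [n] else acc.1,
       if PySem.Chars.isIn [n] lastB then acc.2 ++ [n] else acc.2)) ([], [])
  r.1 == r.2

-- ===== PORT B =====
-- the bits dict of Source B
def pvBits : PySem.Dict Char Nat :=
  PySem.Dict.mk [('a', 1), ('e', 2), ('i', 4), ('o', 8), ('u', 16)]

-- the 'for ch in reversed(t): if ch == ' ': break; m |= bits.get(ch.lower(), 0)' loop
def pvMaskGo : List Char → Nat → Nat
  | [], m => m
  | c :: rest, m =>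
      if c = ' ' then m
      else pvMaskGo rest (m ||| pvBits.getD (PySem.Chars.lowerChar c) 0)

def pvLastWordMask (t : String) : Nat := pvMaskGo t.toList.reverse 0

def does_rhyme_alt (txt1 : String) (txt2 : String) : Bool :=
  pvLastWordMask txt1 == pvLastWordMask txt2

-- ===== PRECONDITION & SPEC =====
def Spec_does_rhyme (txt1 : String) (txt2 : String) (out : Bool) : Prop := out = does_rhyme_alt txt1 txt2
instance (txt1 : String) (txt2 : String) (out : Bool) : Decidable (Spec_does_rhyme txt1 txt2 out) := by unfold Spec_does_rhyme; infer_instance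

-- ===== CLAIM =====
def Claim_equal_does_rhyme : Prop := ∀ (txt1 : String) (txt2 : String), Dom_does_rhyme txt1 txt2 → Spec_does_rhyme txt1 txt2 (does_rhyme txt1 txt2)

-- ===== LEMMAS AND PROOFS =====

-- cons the piece p onto the head of the first chunk
def pvConsH (p : List Char) : List (List Char) → List (List Char)
  | [] => [p]
  | x :: xs => (p ++ x) :: xs

-- reference single-space split
def pvSplit : List Char → List (List Char)
  | [] => [[]]
  | c :: r => if c = ' ' then [] :: pvSplit r else pvConsH [c] (pvSplit r)

-- the suffix of s after its last space
def pvLastW : List Char → List Char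
  | [] => []
  | c :: r => if ' ' ∈ r then pvLastW r else if c = ' ' then r else c :: r

-- order-free vowel mask of a word
def pvWMask : List Char → Nat
  | [] => 0
  | c :: r => pvBits.getD (PySem.Chars.lowerChar c) 0 ||| pvWMask r

def pvN (ba be bi bo bu : Bool) : Nat :=
  (cond ba 1 0) ||| (cond be 2 0) ||| (cond bi 4 0) ||| (cond bo 8 0) ||| (cond bu 16 0)

theorem pvSplit_ne_nil (s : List Char) : pvSplit s ≠ [] := by
  cases s with
  | nil => simp [pvSplit]
  | cons c r =>
      simp only [pvSplit]
      split
      · simp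
      · cases h : pvSplit r <;> simp [pvConsH]

theorem pvConsH_append (a b : List Char) (l : List (List Char)) :
    pvConsH (a ++ b) l = pvConsH a (pvConsH b l) := by
  cases l <;> simp [pvConsH]

theorem pvConsH_nil (l : List (List Char)) (h : l ≠ []) : pvConsH [] l = l := by
  cases l with
  | nil => exact absurd rfl h
  | cons x xs => simp [pvConsH]

theorem pvGo_eq (s : List Char) : ∀ (fuel : Nat) (cur : List Char) (acc : List (List Char)),
    s.length ≤ fuel →
    PySem.Chars.splitOn.go [' '] fuel s cur acc = acc.reverse ++ pvConsH cur.reverse (pvSplit s) := by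
  induction s with
  | nil =>
      intro fuel cur acc _
      cases fuel with
      | zero => rw [PySem.Chars.splitOn.go]; simp [pvSplit, pvConsH]
      | succ f =>
          rw [PySem.Chars.splitOn.go]
          · simp [pvSplit, pvConsH]
          · omega
  | cons c rest ih =>
      intro fuel cur acc hle
      cases fuel with
      | zero => simp at hle
      | succ f =>
          rw [PySem.Chars.splitOn.go]
          by_cases h : c = ' '
          · have hp : List.isPrefixOf [' '] (c :: rest) = true := by
              simp [List.isPrefixOf, h]
            simp only [hp, if_true, List.length_singleton, List.drop_one, List.tail_cons]
            rw [ih f [] (cur.reverse :: acc) (by simpa using Nat.lt_succ_iff.mp (by simpa using hle))]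
            rw [List.reverse_nil, pvConsH_nil _ (pvSplit_ne_nil rest)]
            simp [pvSplit, h, pvConsH]
          · have hp : List.isPrefixOf [' '] (c :: rest) = false := by
              simp [List.isPrefixOf]; exact fun hc => absurd hc.symm h
            simp only [hp, Bool.false_eq_true, if_false]
            rw [ih f (c :: cur) acc (by simpa using Nat.lt_succ_iff.mp (by simpa using hle))]
            simp only [List.reverse_cons, pvConsH_append, pvSplit, h, if_false]

theorem pvSplitOn_space (s : List Char) : PySem.Chars.splitOn s [' '] = pvSplit s := by
  unfold PySem.Chars.splitOn
  rw [pvGo_eq s (s.length + 1) [] [] (by omega)]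
  simp [pvConsH_nil _ (pvSplit_ne_nil s)]

theorem pvLastW_of_not_mem (s : List Char) (h : ' ' ∉ s) : pvLastW s = s := by
  induction s with
  | nil => rfl
  | cons c r ih =>
      simp only [List.mem_cons, not_or] at h
      simp [pvLastW, fun hm => h.2 hm, Ne.symm h.1]

theorem pvSplit_getLast?_consH (s : List Char) : ∀ (p : List Char),
    (pvConsH p (pvSplit s)).getLast? = some (if ' ' ∈ s then pvLastW s else p ++ s) := by
  induction s with
  | nil => intro p; simp [pvSplit, pvConsH]
  | cons c r ih =>
      intro p
      by_cases h : c = ' '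
      · simp only [pvSplit, h, if_true]
        have h1 : pvConsH p ([] :: pvSplit r) = p :: pvSplit r := by simp [pvConsH]
        rw [h1]
        obtain ⟨x, xs, hx⟩ : ∃ x xs, pvSplit r = x :: xs := by
          cases hq : pvSplit r with
          | nil => exact absurd hq (pvSplit_ne_nil r)
          | cons x xs => exact ⟨x, xs, rfl⟩
        have h2 := ih []
        rw [pvConsH_nil _ (pvSplit_ne_nil r)] at h2
        rw [hx, List.getLast?_cons_cons, ← hx, h2]
        simp [pvLastW]
      · simp only [pvSplit, h, if_false]
        rw [← pvConsH_append]
        rw [ih (p ++ [c])]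
        by_cases hr : ' ' ∈ r
        · simp [List.mem_cons, hr, pvLastW]
        · simp [List.mem_cons, hr, Ne.symm h]

theorem pvSplit_getLast? (s : List Char) :
    (pvSplit s).getLast? = some (pvLastW s) := by
  have h := pvSplit_getLast?_consH s []
  rw [pvConsH_nil _ (pvSplit_ne_nil s)] at h
  rw [h]
  split
  · rfl
  · rename_i hn; simp [pvLastW_of_not_mem s hn]

theorem pvMaskGo_eq (l : List Char) : ∀ m, pvMaskGo l m = m ||| pvWMask (l.takeWhile (· ≠ ' ')) := by
  induction l with
  | nil => intro m; simp [pvMaskGo, pvWMask]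
  | cons c r ih =>
      intro m
      by_cases h : c = ' '
      · simp [pvMaskGo, h, List.takeWhile, pvWMask]
      · simp only [pvMaskGo, h, if_false, List.takeWhile_cons, decide_not]
        rw [ih]
        simp [pvWMask, Nat.or_assoc]

-- lowerChar maps nothing onto the space and keeps the space
theorem pvLowerChar_space_iff (c : Char) : PySem.Chars.lowerChar c = ' ' ↔ c = ' ' := by
  unfold PySem.Chars.lowerChar PySem.Chars.isupper
  split
  · rename_i h
    simp only [Bool.and_eq_true, decide_eq_true_eq] at h
    have h1 : 65 ≤ c.toNat := by
      have := h.1; rw [Char.le_def, UInt32.le_iff_toNat_le] at this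
      exact this
    have h2 : c.toNat ≤ 90 := by
      have := h.2; rw [Char.le_def, UInt32.le_iff_toNat_le] at this
      exact this
    constructor
    · intro he
      exfalso
      have ht : (Char.ofNat (c.toNat + 32)).toNat = (' ' : Char).toNat := by rw [he]
      have hv : (c.toNat + 32).isValidChar := by
        constructor; change c.toNat + 32 < 55296; omega
      rw [Char.toNat_ofNat, if_pos hv] at ht
      have hs : (' ' : Char).toNat = 32 := rfl
      omega
    · intro he; subst he
      have hs : (' ' : Char).toNat = 32 := rfl
      omega
  · simp

theorem pvTakeWhile_reverse (t : List Char) :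
    t.reverse.takeWhile (· ≠ ' ') = (pvLastW t).reverse := by
  induction t with
  | nil => simp [pvLastW]
  | cons c r ih =>
      simp only [List.reverse_cons]
      rw [List.takeWhile_append]
      by_cases hr : ' ' ∈ r
      · have hlt : ¬ (List.takeWhile (fun x => x ≠ ' ') r.reverse).length = r.reverse.length := by
          intro hlen
          have heq : List.takeWhile (fun x => x ≠ ' ') r.reverse = r.reverse :=
            (List.takeWhile_prefix _).eq_of_length hlen
          have := List.takeWhile_eq_self_iff.mp heq ' ' (by simpa using hr)
          simp at this
        rw [if_neg hlt, ih]
        simp [pvLastW, hr]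
      · have ht : List.takeWhile (fun x => x ≠ ' ') r.reverse = r.reverse := by
          rw [List.takeWhile_eq_self_iff]
          intro x hx
          simp only [List.mem_reverse] at hx
          simp only [decide_eq_true_eq]
          intro hxs; exact hr (hxs ▸ hx)
        rw [if_pos (by rw [ht])]
        by_cases hc : c = ' '
        · simp [List.takeWhile, hc, pvLastW, hr]
        · simp [List.takeWhile, hc, pvLastW, hr]

theorem pvWMask_append (a b : List Char) : pvWMask (a ++ b) = pvWMask a ||| pvWMask b := by
  induction a with
  | nil => simp [pvWMask]
  | cons c r ih => simp [pvWMask, ih, Nat.or_assoc]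

theorem pvWMask_reverse (l : List Char) : pvWMask l.reverse = pvWMask l := by
  induction l with
  | nil => rfl
  | cons c r ih =>
      simp only [List.reverse_cons, pvWMask_append, ih, pvWMask]
      cases h : pvBits.getD (PySem.Chars.lowerChar c) 0 <;> simp [Nat.or_comm]

theorem pvWMask_eq (w : List Char) :
    pvWMask w = pvN (w.any (fun c => PySem.Chars.lowerChar c == 'a'))
                    (w.any (fun c => PySem.Chars.lowerChar c == 'e'))
                    (w.any (fun c => PySem.Chars.lowerChar c == 'i'))
                    (w.any (fun c => PySem.Chars.lowerChar c == 'o'))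
                    (w.any (fun c => PySem.Chars.lowerChar c == 'u')) := by
  induction w with
  | nil => simp [pvWMask, pvN]
  | cons c r ih =>
      simp only [pvWMask, List.any_cons, ih]
      generalize (r.any fun c => PySem.Chars.lowerChar c == 'a') = b1
      generalize (r.any fun c => PySem.Chars.lowerChar c == 'e') = b2
      generalize (r.any fun c => PySem.Chars.lowerChar c == 'i') = b3
      generalize (r.any fun c => PySem.Chars.lowerChar c == 'o') = b4
      generalize (r.any fun c => PySem.Chars.lowerChar c == 'u') = b5
      by_cases h1 : PySem.Chars.lowerChar c = 'a'
      · rw [h1, show pvBits.getD 'a' 0 = 1 from rfl]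
        simp only [show (('a':Char) == 'a') = true from rfl, show (('a':Char) == 'e') = false from rfl,
          show (('a':Char) == 'i') = false from rfl, show (('a':Char) == 'o') = false from rfl,
          show (('a':Char) == 'u') = false from rfl, Bool.true_or, Bool.false_or]
        revert b1 b2 b3 b4 b5; decide
      by_cases h2 : PySem.Chars.lowerChar c = 'e'
      · rw [h2, show pvBits.getD 'e' 0 = 2 from rfl]
        simp only [show (('e':Char) == 'a') = false from rfl, show (('e':Char) == 'e') = true from rfl,
          show (('e':Char) == 'i') = false from rfl, show (('e':Char) == 'o') = false from rfl,
          show (('e':Char) == 'u') = false from rfl, Bool.true_or, Bool.false_or]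
        revert b1 b2 b3 b4 b5; decide
      by_cases h3 : PySem.Chars.lowerChar c = 'i'
      · rw [h3, show pvBits.getD 'i' 0 = 4 from rfl]
        simp only [show (('i':Char) == 'a') = false from rfl, show (('i':Char) == 'e') = false from rfl,
          show (('i':Char) == 'i') = true from rfl, show (('i':Char) == 'o') = false from rfl,
          show (('i':Char) == 'u') = false from rfl, Bool.true_or, Bool.false_or]
        revert b1 b2 b3 b4 b5; decide
      by_cases h4 : PySem.Chars.lowerChar c = 'o'
      · rw [h4, show pvBits.getD 'o' 0 = 8 from rfl]
        simp only [show (('o':Char) == 'a') = false from rfl, show (('o':Char) == 'e') = false from rfl,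
          show (('o':Char) == 'i') = false from rfl, show (('o':Char) == 'o') = true from rfl,
          show (('o':Char) == 'u') = false from rfl, Bool.true_or, Bool.false_or]
        revert b1 b2 b3 b4 b5; decide
      by_cases h5 : PySem.Chars.lowerChar c = 'u'
      · rw [h5, show pvBits.getD 'u' 0 = 16 from rfl]
        simp only [show (('u':Char) == 'a') = false from rfl, show (('u':Char) == 'e') = false from rfl,
          show (('u':Char) == 'i') = false from rfl, show (('u':Char) == 'o') = false from rfl,
          show (('u':Char) == 'u') = true from rfl, Bool.true_or, Bool.false_or]
        revert b1 b2 b3 b4 b5; decide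
      · have hz : pvBits.getD (PySem.Chars.lowerChar c) 0 = 0 := by
          simp [pvBits, PySem.Dict.getD, PySem.Dict.get?,
            Ne.symm h1, Ne.symm h2, Ne.symm h3, Ne.symm h4, Ne.symm h5]
        rw [hz]
        simp only [beq_eq_false_iff_ne.mpr h1, beq_eq_false_iff_ne.mpr h2, beq_eq_false_iff_ne.mpr h3,
          beq_eq_false_iff_ne.mpr h4, beq_eq_false_iff_ne.mpr h5, Bool.false_or, Nat.zero_or]

theorem pvN_inj : ∀ b1 b2 b3 b4 b5 c1 c2 c3 c4 c5 : Bool,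
    pvN b1 b2 b3 b4 b5 = pvN c1 c2 c3 c4 c5 ↔
      (b1 = c1 ∧ b2 = c2 ∧ b3 = c3 ∧ b4 = c4 ∧ b5 = c5) := by decide

theorem pvIsIn_singleton_iff_mem (c : Char) (w : List Char) :
    PySem.Chars.isIn [c] w = true ↔ c ∈ w := by
  rw [PySem.Chars.isIn_iff_infix]; exact List.singleton_infix_iff c w

theorem pvSpace_mem_lower (r : List Char) : (' ' ∈ PySem.Chars.lower r) ↔ ' ' ∈ r := by
  unfold PySem.Chars.lower
  rw [List.mem_map]
  constructor
  · rintro ⟨a, ha, hla⟩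
    rwa [(pvLowerChar_space_iff a).mp hla] at ha
  · intro h
    exact ⟨' ', h, (pvLowerChar_space_iff ' ').mpr rfl⟩

theorem pvLastW_lower (t : List Char) :
    pvLastW (PySem.Chars.lower t) = PySem.Chars.lower (pvLastW t) := by
  induction t with
  | nil => rfl
  | cons c r ih =>
      show pvLastW (PySem.Chars.lowerChar c :: PySem.Chars.lower r) = _
      by_cases hr : ' ' ∈ r
      · simp [pvLastW, pvSpace_mem_lower, hr, ih]
      · by_cases hc : c = ' '
        · simp [pvLastW, pvSpace_mem_lower, pvLowerChar_space_iff, hr, hc]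
        · simp [pvLastW, pvLowerChar_space_iff, hr, hc, PySem.Chars.lower]

-- the per-text bridge: A's membership test on the lowered last word equals B's any-scan
theorem pvVowel_bridge (t : List Char) (v : Char) :
    PySem.Chars.isIn [v] (pvLastW (PySem.Chars.lower t)) =
      (pvLastW t).any (fun c => PySem.Chars.lowerChar c == v) := by
  rw [pvLastW_lower]
  rw [Bool.eq_iff_iff, pvIsIn_singleton_iff_mem, List.any_eq_true]
  unfold PySem.Chars.lower
  rw [List.mem_map]
  constructor
  · rintro ⟨a, ha, hla⟩; exact ⟨a, ha, by simp [hla]⟩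
  · rintro ⟨a, ha, hla⟩; exact ⟨a, ha, by simpa using hla⟩

theorem pvLastWordMask_eq (t : String) :
    pvLastWordMask t =
      pvN ((pvLastW t.toList).any (fun c => PySem.Chars.lowerChar c == 'a'))
          ((pvLastW t.toList).any (fun c => PySem.Chars.lowerChar c == 'e'))
          ((pvLastW t.toList).any (fun c => PySem.Chars.lowerChar c == 'i'))
          ((pvLastW t.toList).any (fun c => PySem.Chars.lowerChar c == 'o'))
          ((pvLastW t.toList).any (fun c => PySem.Chars.lowerChar c == 'u')) := by
  unfold pvLastWordMask
  rw [pvMaskGo_eq, pvTakeWhile_reverse, pvWMask_reverse, pvWMask_eq, Nat.zero_or]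

theorem pvPyGetD_split (s : List Char) :
    PySem.List.pyGetD (pvSplit s) (-1) [] = pvLastW s := by
  rw [PySem.List.pyGetD_neg_one _ _ (pvSplit_ne_nil s)]
  have h := pvSplit_getLast? s
  rw [List.getLast?_eq_some_getLast (pvSplit_ne_nil s), Option.some_inj] at h
  exact h

theorem pvFilterSide (wa wb : List Char) :
    (("aeiou".toList.foldl (fun (acc : List Char × List Char) n =>
        (if PySem.Chars.isIn [n] wa then acc.1 ++ [n] else acc.1,
         if PySem.Chars.isIn [n] wb then acc.2 ++ [n] else acc.2)) ([], [])).1 ==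
     ("aeiou".toList.foldl (fun (acc : List Char × List Char) n =>
        (if PySem.Chars.isIn [n] wa then acc.1 ++ [n] else acc.1,
         if PySem.Chars.isIn [n] wb then acc.2 ++ [n] else acc.2)) ([], [])).2) =
    (List.filter (fun n => PySem.Chars.isIn [n] wa) "aeiou".toList ==
     List.filter (fun n => PySem.Chars.isIn [n] wb) "aeiou".toList) := by
  rw [PySem.List.foldl_prod_mk
        (f := fun acc n => if PySem.Chars.isIn [n] wa then acc ++ [n] else acc)
        (g := fun acc n => if PySem.Chars.isIn [n] wb then acc ++ [n] else acc)]
  rw [PySem.List.foldl_append_if_eq_filter, PySem.List.foldl_append_if_eq_filter]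
  simp only [List.nil_append]

theorem pvCore (t1 t2 : String) : does_rhyme t1 t2 = does_rhyme_alt t1 t2 := by
  unfold does_rhyme does_rhyme_alt
  rw [pvFilterSide, pvSplitOn_space, pvSplitOn_space, pvPyGetD_split, pvPyGetD_split,
    pvLastWordMask_eq, pvLastWordMask_eq]
  rw [Bool.eq_iff_iff, beq_iff_eq, beq_iff_eq, pvN_inj]
  constructor
  · intro h
    have hv : ∀ v, v ∈ "aeiou".toList →
        PySem.Chars.isIn [v] (pvLastW (PySem.Chars.lower t1.toList)) =
        PySem.Chars.isIn [v] (pvLastW (PySem.Chars.lower t2.toList)) := by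
      intro v hvmem
      have hm : v ∈ List.filter (fun n => PySem.Chars.isIn [n] (pvLastW (PySem.Chars.lower t1.toList))) "aeiou".toList ↔
                v ∈ List.filter (fun n => PySem.Chars.isIn [n] (pvLastW (PySem.Chars.lower t2.toList))) "aeiou".toList := by
        rw [h]
      simp only [List.mem_filter, hvmem, true_and] at hm
      rw [Bool.eq_iff_iff]; exact hm
    refine ⟨?_, ?_, ?_, ?_, ?_⟩ <;>
      rw [← pvVowel_bridge, ← pvVowel_bridge]
    · exact hv 'a' (by decide)
    · exact hv 'e' (by decide)
    · exact hv 'i' (by decide)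
    · exact hv 'o' (by decide)
    · exact hv 'u' (by decide)
  · intro h
    apply List.filter_congr
    intro v hvmem
    have : v = 'a' ∨ v = 'e' ∨ v = 'i' ∨ v = 'o' ∨ v = 'u' := by
      simpa using hvmem
    rcases this with rfl | rfl | rfl | rfl | rfl <;>
      rw [pvVowel_bridge, pvVowel_bridge]
    · exact h.1
    · exact h.2.1
    · exact h.2.2.1
    · exact h.2.2.2.1
    · exact h.2.2.2.2

-- ===== VERDICT =====
theorem does_rhyme_spec : Claim_equal_does_rhyme := by
  intro txt1 txt2 _
  unfold Spec_does_rhyme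
  exact pvCore txt1 txt2
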